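-- pv_equiv track=rewrite | github.com/areeba-shahid/DSA-Lab-1 | 2023-CS-186-Week-1.py | SearchA
-- ===== SOURCE A (Python) =====
-- def  SearchA(array , number,emptyArray=None,index=0):
--
--     if(emptyArray is  None):
--       emptyArray=[]
--
--     if(index == len(array)) :
--         return emptyArray
--
--     else :
--
--         if(array[index] == number):
--             emptyArray.append(index)
--     return SearchA(array,number,emptyArray,index+1)
-- ===== SOURCE B (Python) =====
-- def SearchA(array, number, emptyArray=None, index=0):
--     if emptyArray is None:
--         emptyArray = []
--     for i in range(index, len(array)):
--         if array[i] == number: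
--             emptyArray.append(i)
--     return emptyArray
-- ===== Notes on version B (the rewrite author's own statement) =====
-- stated objective: simpler
-- what changed: Tail recursion with an explicit accumulator and index parameter is replaced by a plain for-loop over range(index, len(array)) appending to the same list, avoiding Python's recursion depth limit.
import Mathlib
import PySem

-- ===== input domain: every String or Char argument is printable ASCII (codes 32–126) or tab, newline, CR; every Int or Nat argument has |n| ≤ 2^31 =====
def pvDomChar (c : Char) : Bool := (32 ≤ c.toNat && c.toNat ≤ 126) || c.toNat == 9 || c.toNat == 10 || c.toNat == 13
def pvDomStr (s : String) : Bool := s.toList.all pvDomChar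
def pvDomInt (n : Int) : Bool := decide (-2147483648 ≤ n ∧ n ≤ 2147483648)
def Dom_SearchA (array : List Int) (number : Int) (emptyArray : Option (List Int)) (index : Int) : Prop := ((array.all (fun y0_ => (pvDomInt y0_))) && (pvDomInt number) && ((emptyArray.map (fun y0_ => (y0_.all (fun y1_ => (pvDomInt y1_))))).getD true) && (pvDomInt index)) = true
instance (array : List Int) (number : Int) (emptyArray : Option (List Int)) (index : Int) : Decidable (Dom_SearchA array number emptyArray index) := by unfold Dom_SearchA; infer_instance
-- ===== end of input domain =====

-- B replaces A's tail recursion by a plain loop over range(index, len(array)); the proof is about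
-- the RETURN value only (both Pythons append to the same caller-supplied list, so side effects match).

-- ===== PORT A =====
-- A's tail recursion on the growing index; `none` from pyGet? is Python's IndexError (outside Pre_,
-- where the port just stops with the accumulator so it stays total).
def SearchAgo (array : List Int) (number : Int) (ea : List Int) (index : Int) : List Int :=
  if index = (array.length : Int) then ea
  else
    match h : PySem.List.pyGet? array index with
    | none => ea
    | some v =>
        SearchAgo array number (if v = number then ea ++ [index] else ea) (index + 1)
termination_by ((array.length : Int) - index).toNat
decreasing_by
  have hlt : index < (array.length : Int) := by
    by_contra hge
    have : PySem.List.pyGet? array index = none := by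
      rw [PySem.List.pyGet?_eq_none_iff]
      intro hr
      exact absurd hr.2 hge
    simp [this] at h
  omega

def SearchA (array : List Int) (number : Int) (emptyArray : Option (List Int)) (index : Int) : List Int :=
  SearchAgo array number (emptyArray.getD []) index

-- ===== PORT B =====
-- Source B's for-loop over range(index, len(array)) as a fold; array[i] is pyGet? (IndexError impossible inside Pre_).
def SearchA_alt (array : List Int) (number : Int) (emptyArray : Option (List Int)) (index : Int) : List Int :=
  (PySem.List.pyRange index (array.length : Int) 1).foldl
    (fun acc i =>
      match PySem.List.pyGet? array i with
      | none => acc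
      | some v => if v = number then acc ++ [i] else acc)
    (emptyArray.getD [])

-- ===== PRECONDITION & SPEC =====
-- Pre_ excludes exactly the inputs where Python A raises: index < -len(array) (IndexError via
-- negative-index wraparound out of range) and index > len(array) (unbounded recursion, RecursionError).
def Pre_SearchA (array : List Int) (number : Int) (emptyArray : Option (List Int)) (index : Int) : Prop :=
  -(array.length : Int) ≤ index ∧ index ≤ (array.length : Int)
instance (array : List Int) (number : Int) (emptyArray : Option (List Int)) (index : Int) : Decidable (Pre_SearchA array number emptyArray index) := by unfold Pre_SearchA; infer_instance

def pvWitness_SearchA : List Int × Int × Option (List Int) × Int := ([1, 2, 1], 1, none, 0)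

def Spec_SearchA (array : List Int) (number : Int) (emptyArray : Option (List Int)) (index : Int) (out : List Int) : Prop := out = SearchA_alt array number emptyArray index
instance (array : List Int) (number : Int) (emptyArray : Option (List Int)) (index : Int) (out : List Int) : Decidable (Spec_SearchA array number emptyArray index out) := by unfold Spec_SearchA; infer_instance

-- ===== CLAIM (what is proved, stated in full; the proofs are below) =====
def Claim_equal_SearchA : Prop := ∀ (array : List Int) (number : Int) (emptyArray : Option (List Int)) (index : Int), Dom_SearchA array number emptyArray index → Pre_SearchA array number emptyArray index → Spec_SearchA array number emptyArray index (SearchA array number emptyArray index)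

-- ===== LEMMAS AND PROOFS =====

-- Core invariant: from any admissible start index the recursion of A computes the fold of B.
theorem SearchAgo_eq_fold (array : List Int) (number : Int) :
    ∀ (n : Nat) (index : Int) (ea : List Int),
      ((array.length : Int) - index).toNat = n →
      -(array.length : Int) ≤ index → index ≤ (array.length : Int) →
      SearchAgo array number ea index =
        (PySem.List.pyRange index (array.length : Int) 1).foldl
          (fun acc i =>
            match PySem.List.pyGet? array i with
            | none => acc
            | some v => if v = number then acc ++ [i] else acc) ea := by
  intro n
  induction n with
  | zero =>
      intro index ea hn hlo hhi
      have hix : index = (array.length : Int) := by omega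
      rw [SearchAgo, if_pos hix, hix, PySem.List.pyRange_one_eq_nil (by omega)]
      rfl
  | succ k ih =>
      intro index ea hn hlo hhi
      have hlt : index < (array.length : Int) := by omega
      have hsome : ∃ v, PySem.List.pyGet? array index = some v := by
        rcases h : PySem.List.pyGet? array index with _ | v
        · rw [PySem.List.pyGet?_eq_none_iff] at h
          exact absurd ⟨hlo, hlt⟩ h
        · exact ⟨v, rfl⟩
      rcases hsome with ⟨v, hv⟩
      rw [SearchAgo, if_neg (by omega), hv, PySem.List.pyRange_one_cons hlt, List.foldl_cons]
      simp only [hv]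
      exact ih (index + 1) _ (by omega) (by omega) (by omega)

-- ===== VERDICT (by name: the statement is the Claim_ definition above) =====
theorem SearchA_spec : Claim_equal_SearchA := by
  intro array number emptyArray index _ hpre
  show SearchA array number emptyArray index = SearchA_alt array number emptyArray index
  exact SearchAgo_eq_fold array number _ index _ rfl hpre.1 hpre.2
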